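-- pv_equiv track=rewrite | github.com/bangtugu/Algorithm | PROGRAMMERS/수레_움직이기.py | solution
-- ===== SOURCE A (Python) =====
-- def solution(maze):
--     N, M = len(maze), len(maze[0])
--     '''
--     0	빈칸
--     1	빨간 수레의 시작 칸
--     2	파란 수레의 시작 칸
--     3	빨간 수레의 도착 칸
--     4	파란 수레의 도착 칸
--     5	벽
--     '''
--
--     ry = rx = by = bx = rey = rex = bey = bex = 0
--     red_check = [[0]*M for _ in range(N)]
--     blue_check = [[0]*M for _ in range(N)]
--
--     for i in range(N):
--         for j in range(M):
--             if maze[i][j] == 1: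
--                 ry, rx = i, j
--             elif maze[i][j] == 2:
--                 by, bx = i, j
--             elif maze[i][j] == 3:
--                 rey, rex = i, j
--             elif maze[i][j] == 4:
--                 bey, bex = i, j
--
--     red_check[ry][rx] = 1
--     blue_check[by][bx] = 1
--
--     dy = [0, 0, 1, -1]
--     dx = [1, -1, 0, 0]
--
--
--     def path_finder(ry, rx, by, bx, n, m):
--
--         rf = bf = False
--         if ry == rey and rx == rex: rf = True
--         if by == bey and bx == bex: bf = True
--         if rf and bf: return n
--
--         red_possible = []
--         blue_possible = []
--         for i in range(4):
--             if not rf: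
--                 nry = ry + dy[i]
--                 nrx = rx + dx[i]
--                 if nry < 0 or nry >= N or nrx < 0 or nrx >= M: continue
--                 if red_check[nry][nrx]: continue
--                 if maze[nry][nrx] == 5: continue
--
--                 red_possible.append([nry, nrx])
--
--         for i in range(4):
--             if not bf:
--                 nby = by + dy[i]
--                 nbx = bx + dx[i]
--                 if nby < 0 or nby >= N or nbx < 0 or nbx >= M: continue
--                 if blue_check[nby][nbx]: continue
--                 if maze[nby][nbx] == 5: continue
--
--                 blue_possible.append([nby, nbx])
--
--         if (not rf and not red_possible) or (not bf and not blue_possible):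
--             return m
--
--         if not rf and not bf:
--             for nry, nrx in red_possible:
--                 for nby, nbx in blue_possible:
--                     if nry == nby and nrx == nbx: continue
--                     if nry == by and nrx == bx and nby == ry and nbx == rx: continue
--
--                     red_check[nry][nrx] = n+2
--                     blue_check[nby][nbx] = n+2
--                     m = min(path_finder(nry, nrx, nby, nbx, n+1, m), m)
--                     red_check[nry][nrx] = 0
--                     blue_check[nby][nbx] = 0
--
--         elif not rf:
--             for nry, nrx in red_possible:
--                 if nry == by and nrx == bx: continue
--
--                 red_check[nry][nrx] = n+2
--                 m = min(path_finder(nry, nrx, by, bx, n+1, m), m)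
--                 red_check[nry][nrx] = 0
--
--         else:
--             for nby, nbx in blue_possible:
--                 if nby == ry and nbx == rx: continue
--
--                 blue_check[nby][nbx] = n+2
--                 m = min(path_finder(ry, rx, nby, nbx, n+1, m), m)
--                 blue_check[nby][nbx] = 0
--
--         return m
--
--
--     answer = path_finder(ry, rx, by, bx, 0, 50)
--     if answer == 50:
--         return 0
--     return answer
-- ===== SOURCE B (Python) =====
-- def solution(maze):
--     N, M = len(maze), len(maze[0])
--
--     pos = {}
--     for i in range(N):
--         for j in range(M):
--             c = maze[i][j]
--             if 1 <= c <= 4: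
--                 pos[c] = (i, j)
--     red = pos.get(1, (0, 0))
--     blue = pos.get(2, (0, 0))
--     rgoal = pos.get(3, (0, 0))
--     bgoal = pos.get(4, (0, 0))
--
--     def moves(p, seen):
--         y, x = p
--         cand = ((y, x + 1), (y, x - 1), (y + 1, x), (y - 1, x))
--         return [q for q in cand
--                 if 0 <= q[0] < N and 0 <= q[1] < M
--                 and q not in seen and maze[q[0]][q[1]] != 5]
--
--     # Iterative DFS over an explicit stack of joint states; a finished cart
--     # contributes itself as its only "move", which unifies A's three branches:
--     # the collision guard nr == nb then subsumes A's per-branch stay-off guards.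
--     best = 50
--     stack = [(red, blue, frozenset([red]), frozenset([blue]), 0)]
--     while stack:
--         r, b, rseen, bseen, n = stack.pop()
--         if r == rgoal and b == bgoal:
--             if n < best:
--                 best = n
--             continue
--         rmoves = [r] if r == rgoal else moves(r, rseen)
--         bmoves = [b] if b == bgoal else moves(b, bseen)
--         for nr in rmoves:
--             for nb in bmoves:
--                 if nr == nb or (nr == b and nb == r):
--                     continue
--                 stack.append((nr, nb, rseen | {nr}, bseen | {nb}, n + 1))
--     return 0 if best == 50 else best
-- ===== Notes on version B (the rewrite author's own statement) =====
-- stated objective: alternative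
-- what changed: B replaces A's recursive backtracking (threaded min-accumulator, mutate/restore check grids, three rf/bf branch cases) with an iterative DFS over an explicit stack of immutable joint states (positions, frozen visited sets, depth) and a single running best, unifying A's three branches by letting a finished cart contribute itself as its only move so one collision/swap guard covers all cases.
import Mathlib
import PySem

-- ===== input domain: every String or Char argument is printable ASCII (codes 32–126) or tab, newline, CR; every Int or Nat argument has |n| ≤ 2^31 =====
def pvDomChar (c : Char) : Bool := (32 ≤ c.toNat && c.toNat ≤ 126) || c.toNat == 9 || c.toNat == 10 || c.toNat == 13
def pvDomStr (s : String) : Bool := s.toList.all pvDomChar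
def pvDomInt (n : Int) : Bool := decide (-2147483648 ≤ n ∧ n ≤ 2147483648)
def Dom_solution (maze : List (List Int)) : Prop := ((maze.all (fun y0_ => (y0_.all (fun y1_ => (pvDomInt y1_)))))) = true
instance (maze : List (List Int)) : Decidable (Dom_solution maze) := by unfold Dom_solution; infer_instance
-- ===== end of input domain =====

-- B replaces A's recursive backtracking (threaded min-accumulator, mutate/restore check
-- grids, three rf/bf branch cases) with an iterative DFS over an explicit stack of
-- immutable joint states and a single running best, with A's three branches unified by
-- letting a finished cart contribute itself as its only move. Objective: alternative.

-- ===== PORT A =====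
-- shared indexing helper: g[y][x] (exact: every use is guarded by 0 ≤ y < len g, 0 ≤ x < len row)
def getCell (g : List (List Int)) (y x : Int) : Int :=
  PySem.List.pyGetD (PySem.List.pyGetD g y []) x 0

-- g[y][x] = v (exact under the same in-range guards)
def setCell (g : List (List Int)) (y x v : Int) : List (List Int) :=
  PySem.List.pySetD g y (PySem.List.pySetD (PySem.List.pyGetD g y []) x v)

def dyA : List Int := [0, 0, 1, -1]
def dxA : List Int := [1, -1, 0, 0]

-- the `for i in range(4): if not f: … append` loop building red_possible / blue_possible
def possibleA (maze : List (List Int)) (N M : Int) (chk : List (List Int))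
    (y x : Int) (f : Bool) : List (Int × Int) :=
  (PySem.List.pyRange 0 4 1).foldl (fun acc i =>
    if f then acc else
    let ny := y + PySem.List.pyGetD dyA i 0
    let nx := x + PySem.List.pyGetD dxA i 0
    if ny < 0 ∨ N ≤ ny ∨ nx < 0 ∨ M ≤ nx then acc
    else if getCell chk ny nx ≠ 0 then acc
    else if getCell maze ny nx = 5 then acc
    else acc ++ [(ny, nx)]) []

-- path_finder; the mutate-recurse-restore on red_check/blue_check becomes passing the
-- updated grid to the recursive call (the cell written was 0, so the restore is the
-- original grid); fuel only makes the recursion structural, it never runs out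
def pfA (maze : List (List Int)) (N M rey rex bey bex : Int) :
    Nat → List (List Int) → List (List Int) → Int → Int → Int → Int → Int → Int → Int
  | 0, _, _, _, _, _, _, _, m => m
  | fuel+1, rc, bc, ry, rx, byy, bxx, n, m =>
    let rf : Bool := ry == rey && rx == rex
    let bf : Bool := byy == bey && bxx == bex
    if rf && bf then n
    else
      let redP := possibleA maze N M rc ry rx rf
      let blueP := possibleA maze N M bc byy bxx bf
      if (!rf && redP.isEmpty) || (!bf && blueP.isEmpty) then m
      else if !rf && !bf then
        redP.foldl (fun m nr =>
          blueP.foldl (fun m nb =>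
            if nr.1 == nb.1 && nr.2 == nb.2 then m
            else if nr.1 == byy && nr.2 == bxx && nb.1 == ry && nb.2 == rx then m
            else min (pfA maze N M rey rex bey bex fuel
                (setCell rc nr.1 nr.2 (n+2)) (setCell bc nb.1 nb.2 (n+2))
                nr.1 nr.2 nb.1 nb.2 (n+1) m) m) m) m
      else if !rf then
        redP.foldl (fun m nr =>
          if nr.1 == byy && nr.2 == bxx then m
          else min (pfA maze N M rey rex bey bex fuel
              (setCell rc nr.1 nr.2 (n+2)) bc nr.1 nr.2 byy bxx (n+1) m) m) m
      else
        blueP.foldl (fun m nb =>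
          if nb.1 == ry && nb.2 == rx then m
          else min (pfA maze N M rey rex bey bex fuel
              rc (setCell bc nb.1 nb.2 (n+2)) ry rx nb.1 nb.2 (n+1) m) m) m

-- the double scan assigning ry,rx / by,bx / rey,rex / bey,bex (grouped as four pairs)
def scanA (maze : List (List Int)) (N M : Int) :
    (Int × Int) × (Int × Int) × (Int × Int) × (Int × Int) :=
  (PySem.List.pyRange 0 N 1).foldl (fun s i =>
    (PySem.List.pyRange 0 M 1).foldl (fun s j =>
      if getCell maze i j = 1 then ((i, j), s.2.1, s.2.2.1, s.2.2.2)
      else if getCell maze i j = 2 then (s.1, (i, j), s.2.2.1, s.2.2.2)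
      else if getCell maze i j = 3 then (s.1, s.2.1, (i, j), s.2.2.2)
      else if getCell maze i j = 4 then (s.1, s.2.1, s.2.2.1, (i, j))
      else s) s) ((0, 0), (0, 0), (0, 0), (0, 0))

def solution (maze : List (List Int)) : Int :=
  let N : Int := maze.length
  let M : Int := (PySem.List.pyGetD maze 0 []).length
  let s := scanA maze N M
  let zeros : List (List Int) :=
    List.replicate maze.length (List.replicate (PySem.List.pyGetD maze 0 []).length (0 : Int))
  let rc := setCell zeros s.1.1 s.1.2 1
  let bc := setCell zeros s.2.1.1 s.2.1.2 1
  let fuel : Nat := 2 * maze.length * (PySem.List.pyGetD maze 0 []).length + 4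
  let answer := pfA maze N M s.2.2.1.1 s.2.2.1.2 s.2.2.2.1 s.2.2.2.2 fuel
      rc bc s.1.1 s.1.2 s.2.1.1 s.2.1.2 0 50
  if answer == 50 then 0 else answer

-- ===== PORT B =====
-- moves(p, seen): candidate list filtered in one pass
def movesB (maze : List (List Int)) (N M : Int) (p : Int × Int)
    (seen : PySem.Set (Int × Int)) : List (Int × Int) :=
  [(p.1, p.2 + 1), (p.1, p.2 - 1), (p.1 + 1, p.2), (p.1 - 1, p.2)].filter (fun q =>
    decide (0 ≤ q.1) && decide (q.1 < N) && decide (0 ≤ q.2) && decide (q.2 < M) &&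
    !(PySem.Set.contains seen q) && decide (getCell maze q.1 q.2 ≠ 5))

-- one stack entry of B's loop; d is fuel making the loop's recursion well-founded
structure EntB where
  r : Int × Int
  b : Int × Int
  rs : PySem.Set (Int × Int)
  bs : PySem.Set (Int × Int)
  n : Int
  d : Nat

-- the nested `for nr in rmoves: for nb in bmoves: … stack.append(…)` push list
def childEntries (maze : List (List Int)) (N M : Int) (rg bg : Int × Int)
    (r b : Int × Int) (rs bs : PySem.Set (Int × Int)) (n : Int) (d : Nat) : List EntB :=
  let rl := if r == rg then [r] else movesB maze N M r rs
  let bl := if b == bg then [b] else movesB maze N M b bs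
  rl.flatMap (fun nr =>
    (bl.filter (fun nb => !(nr == nb || (nr == b && nb == r)))).map
      (fun nb => ⟨nr, nb, PySem.Set.union rs [nr], PySem.Set.union bs [nb], n + 1, d⟩))

theorem movesB_length_le (maze : List (List Int)) (N M : Int) (p : Int × Int)
    (seen : PySem.Set (Int × Int)) : (movesB maze N M p seen).length ≤ 4 := by
  have h := List.length_filter_le (l := [(p.1, p.2 + 1), (p.1, p.2 - 1), (p.1 + 1, p.2), (p.1 - 1, p.2)])
    (p := fun q => decide (0 ≤ q.1) && decide (q.1 < N) && decide (0 ≤ q.2) && decide (q.2 < M) &&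
      !(PySem.Set.contains seen q) && decide (getCell maze q.1 q.2 ≠ 5))
  simpa [movesB] using h

theorem childEntries_sum_lt (maze : List (List Int)) (N M : Int) (rg bg : Int × Int)
    (r b : Int × Int) (rs bs : PySem.Set (Int × Int)) (n : Int) (d : Nat) :
    (((childEntries maze N M rg bg r b rs bs n d).reverse.map (fun e => 17 ^ e.d)).sum)
      < 17 ^ (d + 1) := by
  have hd : ∀ e ∈ childEntries maze N M rg bg r b rs bs n d, e.d = d := by
    intro e he
    simp only [childEntries, List.mem_flatMap, List.mem_map, List.mem_filter] at he
    obtain ⟨nr, _, nb, _, rfl⟩ := he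
    rfl
  have hlen : (childEntries maze N M rg bg r b rs bs n d).length ≤ 16 := by
    have hrl : (if r == rg then [r] else movesB maze N M r rs).length ≤ 4 := by
      split
      · simp
      · exact movesB_length_le maze N M r rs
    have hbl : (if b == bg then [b] else movesB maze N M b bs).length ≤ 4 := by
      split
      · simp
      · exact movesB_length_le maze N M b bs
    simp only [childEntries, List.length_flatMap]
    calc ((if r == rg then [r] else movesB maze N M r rs).map (fun nr =>
            (((if b == bg then [b] else movesB maze N M b bs).filter
              (fun nb => !(nr == nb || (nr == b && nb == r)))).map
              (fun nb => (⟨nr, nb, PySem.Set.union rs [nr], PySem.Set.union bs [nb], n + 1, d⟩ : EntB))).length)).sum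
        ≤ ((if r == rg then [r] else movesB maze N M r rs).map (fun nr =>
            (((if b == bg then [b] else movesB maze N M b bs).filter
              (fun nb => !(nr == nb || (nr == b && nb == r)))).map
              (fun nb => (⟨nr, nb, PySem.Set.union rs [nr], PySem.Set.union bs [nb], n + 1, d⟩ : EntB))).length)).length • 4 := by
          apply List.sum_le_card_nsmul
          intro x hx
          simp only [List.mem_map] at hx
          obtain ⟨nr, _, rfl⟩ := hx
          simp only [List.length_map]
          exact le_trans (List.length_filter_le _ _) hbl
      _ ≤ 16 := by
          simp only [List.length_map, smul_eq_mul]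
          omega
  have hsum : ((childEntries maze N M rg bg r b rs bs n d).reverse.map (fun e => 17 ^ e.d)).sum
      ≤ 16 * 17 ^ d := by
    have h1 : ∀ x ∈ (childEntries maze N M rg bg r b rs bs n d).reverse.map (fun e => 17 ^ e.d),
        x ≤ 17 ^ d := by
      intro x hx
      simp only [List.mem_map, List.mem_reverse] at hx
      obtain ⟨e, he, rfl⟩ := hx
      rw [hd e he]
    calc _ ≤ ((childEntries maze N M rg bg r b rs bs n d).reverse.map (fun e => 17 ^ e.d)).length • 17 ^ d :=
          List.sum_le_card_nsmul _ _ h1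
      _ ≤ 16 * 17 ^ d := by
          simp only [List.length_map, List.length_reverse, smul_eq_mul]
          exact Nat.mul_le_mul_right _ hlen
  have : 16 * 17 ^ d < 17 ^ (d + 1) := by
    have h17 : 0 < 17 ^ d := Nat.pow_pos (by norm_num : (0:Nat) < 17)
    calc 16 * 17 ^ d < 17 * 17 ^ d := by omega
      _ = 17 ^ (d + 1) := by ring
  omega

-- the `while stack:` loop; pops the head, pushes children reversed so that the Lean
-- list processes them in the same LIFO order as Python's append/pop
def loopB (maze : List (List Int)) (N M : Int) (rg bg : Int × Int) :
    List EntB → Int → Int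
  | [], best => best
  | ⟨_, _, _, _, _, 0⟩ :: rest, best => loopB maze N M rg bg rest best
  | ⟨r, b, rs, bs, n, d+1⟩ :: rest, best =>
    if r == rg && b == bg then
      loopB maze N M rg bg rest (if n < best then n else best)
    else
      loopB maze N M rg bg
        ((childEntries maze N M rg bg r b rs bs n d).reverse ++ rest) best
termination_by stack _ => (stack.map (fun e => 17 ^ e.d)).sum
decreasing_by
  · simp only [List.map_cons, List.sum_cons]
    have : 0 < 17 ^ (0 : Nat) := Nat.one_pos
    omega
  · simp only [List.map_cons, List.sum_cons]
    have : 0 < 17 ^ (d + 1) := Nat.pow_pos (by norm_num : (0:Nat) < 17)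
    omega
  · simp only [List.map_cons, List.sum_cons, List.map_append, List.sum_append]
    have := childEntries_sum_lt maze N M rg bg r b rs bs n d
    omega

-- the `pos[c] = (i, j)` dictionary scan
def scanB (maze : List (List Int)) (N M : Int) : PySem.Dict Int (Int × Int) :=
  (PySem.List.pyRange 0 N 1).foldl (fun d i =>
    (PySem.List.pyRange 0 M 1).foldl (fun d j =>
      let c := getCell maze i j
      if 1 ≤ c ∧ c ≤ 4 then d.insert c (i, j) else d) d) PySem.Dict.empty

def solution_alt (maze : List (List Int)) : Int :=
  let N : Int := maze.length
  let M : Int := (PySem.List.pyGetD maze 0 []).length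
  let pos := scanB maze N M
  let red := pos.getD 1 (0, 0)
  let blue := pos.getD 2 (0, 0)
  let rgoal := pos.getD 3 (0, 0)
  let bgoal := pos.getD 4 (0, 0)
  let d0 : Nat := 2 * maze.length * (PySem.List.pyGetD maze 0 []).length + 4
  let best := loopB maze N M rgoal bgoal
      [⟨red, blue, PySem.Set.ofList [red], PySem.Set.ofList [blue], 0, d0⟩] 50
  if best == 50 then 0 else best

-- ===== PRECONDITION & SPEC =====
-- Pre_ excludes exactly the inputs where A raises IndexError: an empty maze, an empty
-- first row, or a row shorter than the first row (maze[i][j] / red_check[ry][rx] raise).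
def Pre_solution (maze : List (List Int)) : Prop :=
  maze ≠ [] ∧ 0 < (PySem.List.pyGetD maze 0 []).length ∧
    ∀ row ∈ maze, (PySem.List.pyGetD maze 0 []).length ≤ row.length
instance (maze : List (List Int)) : Decidable (Pre_solution maze) := by
  unfold Pre_solution; infer_instance

def pvWitness_solution : List (List Int) := [[1, 2], [3, 4]]

def Spec_solution (maze : List (List Int)) (out : Int) : Prop := out = solution_alt maze
instance (maze : List (List Int)) (out : Int) : Decidable (Spec_solution maze out) := by
  unfold Spec_solution; infer_instance

-- ===== CLAIM (what is proved, stated in full; the proofs are below) =====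
def Claim_equal_solution : Prop :=
  ∀ (maze : List (List Int)), Dom_solution maze → Pre_solution maze →
    Spec_solution maze (solution maze)

-- ===== LEMMAS AND PROOFS =====
-- a check grid has N rows of length M
def ShapeG (g : List (List Int)) (Nn Mn : Nat) : Prop :=
  g.length = Nn ∧ ∀ row ∈ g, row.length = Mn

-- a check grid and a visited set mark the same in-bounds cells
def RepG (g : List (List Int)) (s : PySem.Set (Int × Int)) (Nn Mn : Nat) : Prop :=
  ∀ y x : Int, 0 ≤ y → y < (Nn : Int) → 0 ≤ x → x < (Mn : Int) →
    (getCell g y x ≠ 0 ↔ (y, x) ∈ s)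

theorem getCell_setCell (g : List (List Int)) (Nn Mn : Nat) (hSh : ShapeG g Nn Mn)
    (a b v y x : Int) (ha0 : 0 ≤ a) (ha : a < (Nn : Int)) (hb0 : 0 ≤ b) (hb : b < (Mn : Int))
    (hy0 : 0 ≤ y) (hy : y < (Nn : Int)) (hx0 : 0 ≤ x) (hx : x < (Mn : Int)) :
    getCell (setCell g a b v) y x = if y = a ∧ x = b then v else getCell g y x := by
  obtain ⟨hlen, hrows⟩ := hSh
  have haN : a.toNat < g.length := by omega
  have hyN : y.toNat < g.length := by omega
  have hrowa : PySem.List.pyGetD g a [] = g[a.toNat] :=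
    PySem.List.pyGetD_eq_getElem g [] ha0 (by omega)
  have hla : (g[a.toNat]).length = Mn := hrows _ (List.getElem_mem haN)
  have hset : setCell g a b v = g.set a.toNat ((g[a.toNat]).set b.toNat v) := by
    simp [setCell, hrowa, PySem.List.pySetD_of_nonneg _ _ ha0, PySem.List.pySetD_of_nonneg _ _ hb0]
  rw [hset]
  unfold getCell
  have h1 : PySem.List.pyGetD (g.set a.toNat ((g[a.toNat]).set b.toNat v)) y []
      = (g.set a.toNat ((g[a.toNat]).set b.toNat v))[y.toNat]'(by simp; omega) := by
    apply PySem.List.pyGetD_eq_getElem _ [] hy0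
    simp; omega
  rw [h1, List.getElem_set]
  by_cases hya : y = a
  · subst hya
    rw [if_pos (by omega)]
    rw [PySem.List.pyGetD_eq_getElem _ (0:Int) hx0 (by simp [hla]; omega)]
    rw [List.getElem_set]
    by_cases hxb : x = b
    · subst hxb
      rw [if_pos (by omega), if_pos ⟨rfl, rfl⟩]
    · have hne : ¬ (b.toNat = x.toNat) := by omega
      rw [if_neg hne, if_neg (by tauto)]
      have hrowy : PySem.List.pyGetD g y [] = g[y.toNat] :=
        PySem.List.pyGetD_eq_getElem g [] hy0 (by omega)
      rw [hrowy]
      rw [PySem.List.pyGetD_eq_getElem _ (0:Int) hx0 (by simp [hrows _ (List.getElem_mem hyN)]; omega)]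
  · have hne : ¬ (a.toNat = y.toNat) := by omega
    rw [if_neg hne, if_neg (by tauto)]
    have hrowy : PySem.List.pyGetD g y [] = g[y.toNat] :=
      PySem.List.pyGetD_eq_getElem g [] hy0 (by omega)
    rw [hrowy]

theorem ShapeG_setCell (g : List (List Int)) (Nn Mn : Nat) (hSh : ShapeG g Nn Mn)
    (a b v : Int) (ha0 : 0 ≤ a) (ha : a < (Nn : Int)) (hb0 : 0 ≤ b) (hb : b < (Mn : Int)) :
    ShapeG (setCell g a b v) Nn Mn := by
  obtain ⟨hlen, hrows⟩ := hSh
  have haN : a.toNat < g.length := by omega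
  have hrowa : PySem.List.pyGetD g a [] = g[a.toNat] :=
    PySem.List.pyGetD_eq_getElem g [] ha0 (by omega)
  have hset : setCell g a b v = g.set a.toNat ((g[a.toNat]).set b.toNat v) := by
    simp [setCell, hrowa, PySem.List.pySetD_of_nonneg _ _ ha0, PySem.List.pySetD_of_nonneg _ _ hb0]
  rw [hset]
  refine ⟨by simpa using hlen, ?_⟩
  intro row hrow
  obtain ⟨k, hk, hkeq⟩ := List.getElem_of_mem hrow
  rw [List.getElem_set] at hkeq
  by_cases hka : a.toNat = k
  · rw [if_pos hka] at hkeq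
    subst hkeq
    simpa using hrows _ (List.getElem_mem haN)
  · rw [if_neg hka] at hkeq
    subst hkeq
    exact hrows _ (List.getElem_mem _)

theorem RepG_setCell (g : List (List Int)) (s : PySem.Set (Int × Int)) (Nn Mn : Nat)
    (hSh : ShapeG g Nn Mn) (hRep : RepG g s Nn Mn) (a b v : Int)
    (ha0 : 0 ≤ a) (ha : a < (Nn : Int)) (hb0 : 0 ≤ b) (hb : b < (Mn : Int)) (hv : v ≠ 0) :
    RepG (setCell g a b v) (PySem.Set.union s [(a, b)]) Nn Mn := by
  intro y x hy0 hy hx0 hx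
  rw [getCell_setCell g Nn Mn hSh a b v y x ha0 ha hb0 hb hy0 hy hx0 hx]
  rw [PySem.Set.mem_union]
  by_cases hyx : y = a ∧ x = b
  · rw [if_pos hyx]
    simp [hv, hyx.1, hyx.2]
  · rw [if_neg hyx]
    rw [hRep y x hy0 hy hx0 hx]
    simp only [List.mem_singleton, Prod.mk.injEq]
    constructor
    · exact Or.inl
    · rintro (h | h)
      · exact h
      · exact absurd ⟨h.1, h.2⟩ hyx

theorem step_eq (maze : List (List Int)) (Nn Mn : Nat) (chk : List (List Int))
    (s : PySem.Set (Int × Int)) (hRep : RepG chk s Nn Mn) (ny nx : Int)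
    (acc : List (Int × Int)) :
    (if ny < 0 ∨ (Nn : Int) ≤ ny ∨ nx < 0 ∨ (Mn : Int) ≤ nx then acc
     else if getCell chk ny nx ≠ 0 then acc
     else if getCell maze ny nx = 5 then acc
     else acc ++ [(ny, nx)])
    = acc ++ (if (decide (0 ≤ ny) && decide (ny < (Nn : Int)) && decide (0 ≤ nx) &&
          decide (nx < (Mn : Int)) && !(PySem.Set.contains s (ny, nx)) &&
          decide (getCell maze ny nx ≠ 5)) = true then [(ny, nx)] else []) := by
  by_cases hin : 0 ≤ ny ∧ ny < (Nn : Int) ∧ 0 ≤ nx ∧ nx < (Mn : Int)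
  · rw [if_neg (by omega)]
    have hmem := hRep ny nx hin.1 hin.2.1 hin.2.2.1 hin.2.2.2
    by_cases hc : getCell chk ny nx = 0
    · have hns : (ny, nx) ∉ s := fun h => (hmem.mpr h) hc
      have hcf : PySem.Set.contains s (ny, nx) = false := by
        rw [← Bool.not_eq_true, PySem.Set.contains_iff]
        exact hns
      rw [if_neg (not_not_intro hc)]
      by_cases hw : getCell maze ny nx = 5
      · rw [if_pos hw]
        simp [hw, hns]
      · rw [if_neg hw]
        simp [hw, hns, hin.1, hin.2.1, hin.2.2.1, hin.2.2.2]
    · have hmem' : (ny, nx) ∈ s := hmem.mp hc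
      have hct : PySem.Set.contains s (ny, nx) = true := (PySem.Set.contains_iff _ _).mpr hmem'
      rw [if_pos hc]
      simp [hmem']
  · rw [if_pos (by omega)]
    have : ¬ (0 ≤ ny ∧ ny < (Nn : Int) ∧ 0 ≤ nx ∧ nx < (Mn : Int)) := hin
    rcases not_and_or.mp this with h | h
    · simp [h]
    · rcases not_and_or.mp h with h | h
      · simp [h]
      · rcases not_and_or.mp h with h | h
        · simp [h]
        · simp [h]

theorem possibleA_eq (maze : List (List Int)) (Nn Mn : Nat) (chk : List (List Int))
    (s : PySem.Set (Int × Int)) (y x : Int) (hRep : RepG chk s Nn Mn) :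
    possibleA maze Nn Mn chk y x false = movesB maze Nn Mn (y, x) s := by
  have pr : PySem.List.pyRange 0 4 1 = [0, 1, 2, 3] := by decide
  have d0 : PySem.List.pyGetD dyA (0:Int) 0 = 0 := rfl
  have d1 : PySem.List.pyGetD dyA (1:Int) 0 = 0 := rfl
  have d2 : PySem.List.pyGetD dyA (2:Int) 0 = 1 := rfl
  have d3 : PySem.List.pyGetD dyA (3:Int) 0 = -1 := rfl
  have e0 : PySem.List.pyGetD dxA (0:Int) 0 = 1 := rfl
  have e1 : PySem.List.pyGetD dxA (1:Int) 0 = -1 := rfl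
  have e2 : PySem.List.pyGetD dxA (2:Int) 0 = 0 := rfl
  have e3 : PySem.List.pyGetD dxA (3:Int) 0 = 0 := rfl
  have hm1 : ∀ t : Int, t + (-1) = t - 1 := fun t => by ring
  simp only [possibleA, pr, List.foldl_cons, List.foldl_nil, Bool.false_eq_true, if_false,
    d0, d1, d2, d3, e0, e1, e2, e3, add_zero, hm1]
  rw [step_eq maze Nn Mn chk s hRep, step_eq maze Nn Mn chk s hRep,
    step_eq maze Nn Mn chk s hRep, step_eq maze Nn Mn chk s hRep]
  simp only [movesB, List.filter_cons, List.filter_nil]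
  split_ifs <;> simp

theorem possibleA_true (maze : List (List Int)) (N M : Int) (chk : List (List Int))
    (y x : Int) : possibleA maze N M chk y x true = [] := rfl

theorem mem_movesB (maze : List (List Int)) (N M : Int) (p : Int × Int)
    (s : PySem.Set (Int × Int)) (q : Int × Int) (h : q ∈ movesB maze N M p s) :
    0 ≤ q.1 ∧ q.1 < N ∧ 0 ≤ q.2 ∧ q.2 < M := by
  have := List.of_mem_filter h
  simp only [Bool.and_eq_true, decide_eq_true_eq] at this
  exact ⟨this.1.1.1.1.1, this.1.1.1.1.2, this.1.1.1.2, this.1.1.2⟩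

theorem foldl_min_le {α : Type} (g : Int → α → Int) (h : ∀ acc c, g acc c ≤ acc) :
    ∀ (l : List α) (init : Int), l.foldl g init ≤ init := by
  intro l
  induction l with
  | nil => intro init; exact le_refl _
  | cons c t ih =>
    intro init
    exact le_trans (ih (g init c)) (h init c)

theorem pfA_le (maze : List (List Int)) (N M rey rex bey bex : Int) (fuel : Nat)
    (rc bc : List (List Int)) (ry rx byy bxx n m : Int) :
    pfA maze N M rey rex bey bex fuel rc bc ry rx byy bxx n m ≤ max n m := by
  cases fuel with
  | zero => simp [pfA]
  | succ fuel =>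
    simp only [pfA]
    split_ifs
    · exact le_max_left _ _
    · exact le_max_right _ _
    · refine le_trans (foldl_min_le _ ?_ _ _) (le_max_right _ _)
      intro acc c
      refine foldl_min_le _ ?_ _ _
      intro acc2 c2
      split_ifs
      · exact le_refl _
      · exact le_refl _
      · exact min_le_right _ _
    · refine le_trans (foldl_min_le _ ?_ _ _) (le_max_right _ _)
      intro acc c
      split_ifs
      · exact le_refl _
      · exact min_le_right _ _
    · refine le_trans (foldl_min_le _ ?_ _ _) (le_max_right _ _)
      intro acc c
      split_ifs
      · exact le_refl _
      · exact min_le_right _ _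

-- unified single-step recursion over B's state entries; the functional contents of one
-- pop-and-push round of B's loop, used to relate the loop to A's recursion
def pfU (maze : List (List Int)) (N M : Int) (rg bg : Int × Int) :
    Nat → (Int × Int) → (Int × Int) → PySem.Set (Int × Int) → PySem.Set (Int × Int) →
      Int → Int → Int
  | 0, _, _, _, _, _, best => best
  | d+1, r, b, rs, bs, n, best =>
    if r == rg && b == bg then (if n < best then n else best)
    else (childEntries maze N M rg bg r b rs bs n d).foldl
      (fun best c => pfU maze N M rg bg d c.r c.b c.rs c.bs c.n best) best

theorem pfU_le (maze : List (List Int)) (N M : Int) (rg bg : Int × Int) :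
    ∀ (d : Nat) (r b : Int × Int) (rs bs : PySem.Set (Int × Int)) (n best : Int),
      pfU maze N M rg bg d r b rs bs n best ≤ best := by
  intro d
  induction d with
  | zero => intros; exact le_refl _
  | succ d ih =>
    intro r b rs bs n best
    simp only [pfU]
    split_ifs
    · omega
    · exact le_refl _
    · exact foldl_min_le _ (fun acc (c : EntB) => ih c.r c.b c.rs c.bs c.n acc) _ best

theorem foldl_min_comm {α : Type} (g : Int → α → Int)
    (h : ∀ b c x, g (min c b) x = min c (g b x)) :
    ∀ (l : List α) (b c : Int), l.foldl g (min c b) = min c (l.foldl g b) := by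
  intro l
  induction l with
  | nil => intros; rfl
  | cons x t ih =>
    intro b c
    simp only [List.foldl_cons]
    rw [h b c x, ih]

theorem pfU_minc (maze : List (List Int)) (N M : Int) (rg bg : Int × Int) :
    ∀ (d : Nat) (r b : Int × Int) (rs bs : PySem.Set (Int × Int)) (n best c : Int),
      pfU maze N M rg bg d r b rs bs n (min c best)
        = min c (pfU maze N M rg bg d r b rs bs n best) := by
  intro d
  induction d with
  | zero => intros; rfl
  | succ d ih =>
    intro r b rs bs n best c
    simp only [pfU]
    split_ifs
    · omega
    · omega
    · omega
    · omega
    · exact foldl_min_comm _ (fun b' c' (x : EntB) => ih x.r x.b x.rs x.bs x.n b' c') _ best c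

-- exchange law: processing two entries in either order gives the same running best
theorem pfU_exchange (maze : List (List Int)) (N M : Int) (rg bg : Int × Int)
    (a : Int) (e1 e2 : EntB) :
    pfU maze N M rg bg e2.d e2.r e2.b e2.rs e2.bs e2.n
        (pfU maze N M rg bg e1.d e1.r e1.b e1.rs e1.bs e1.n a)
      = pfU maze N M rg bg e1.d e1.r e1.b e1.rs e1.bs e1.n
        (pfU maze N M rg bg e2.d e2.r e2.b e2.rs e2.bs e2.n a) := by
  have key : ∀ f g : EntB,
      pfU maze N M rg bg g.d g.r g.b g.rs g.bs g.n
          (pfU maze N M rg bg f.d f.r f.b f.rs f.bs f.n a)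
        = min (pfU maze N M rg bg f.d f.r f.b f.rs f.bs f.n a)
            (pfU maze N M rg bg g.d g.r g.b g.rs g.bs g.n a) := by
    intro f g
    have hle : pfU maze N M rg bg f.d f.r f.b f.rs f.bs f.n a ≤ a :=
      pfU_le maze N M rg bg f.d f.r f.b f.rs f.bs f.n a
    conv_lhs => rw [← min_eq_left hle]
    exact pfU_minc maze N M rg bg g.d g.r g.b g.rs g.bs g.n a
      (pfU maze N M rg bg f.d f.r f.b f.rs f.bs f.n a)
  rw [key e1 e2, key e2 e1, min_comm]

theorem foldl_out {α : Type} (F : Int → α → Int)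
    (hcomm : ∀ a x y, F (F a x) y = F (F a y) x) :
    ∀ (l : List α) (a : Int) (x : α), F (l.foldl F a) x = l.foldl F (F a x) := by
  intro l
  induction l with
  | nil => intros; rfl
  | cons y t ih =>
    intro a x
    simp only [List.foldl_cons]
    rw [ih, hcomm]

theorem foldl_reverse_eq {α : Type} (F : Int → α → Int)
    (hcomm : ∀ a x y, F (F a x) y = F (F a y) x) :
    ∀ (l : List α) (a : Int), l.reverse.foldl F a = l.foldl F a := by
  intro l
  induction l with
  | nil => intros; rfl
  | cons y t ih =>
    intro a
    simp only [List.reverse_cons, List.foldl_append, List.foldl_cons, List.foldl_nil]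
    rw [ih, foldl_out F hcomm]

theorem childEntries_d (maze : List (List Int)) (N M : Int) (rg bg : Int × Int)
    (r b : Int × Int) (rs bs : PySem.Set (Int × Int)) (n : Int) (d : Nat) :
    ∀ e ∈ childEntries maze N M rg bg r b rs bs n d, e.d = d := by
  intro e he
  simp only [childEntries, List.mem_flatMap, List.mem_map, List.mem_filter] at he
  obtain ⟨nr, _, nb, _, rfl⟩ := he
  rfl

-- B's stack loop computes exactly the fold of the one-entry recursion over the stack
theorem loopB_eq_foldl (maze : List (List Int)) (N M : Int) (rg bg : Int × Int) :
    ∀ (k : Nat) (stack : List EntB) (best : Int),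
      (stack.map (fun e => 17 ^ e.d)).sum ≤ k →
      loopB maze N M rg bg stack best
        = stack.foldl (fun b e => pfU maze N M rg bg e.d e.r e.b e.rs e.bs e.n b) best := by
  intro k
  induction k using Nat.strong_induction_on with
  | _ k ih =>
    intro stack best hk
    match stack with
    | [] => simp [loopB]
    | (⟨r, b, rs, bs, n, 0⟩ : EntB) :: rest =>
      have h1 : (1:Nat) ≤ 17 ^ (0:Nat) := by norm_num
      have hμ : (rest.map (fun e => 17 ^ e.d)).sum < k := by
        simp only [List.map_cons, List.sum_cons] at hk
        omega
      rw [loopB, ih _ hμ rest best (le_refl _)]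
      simp [pfU]
    | (⟨r, b, rs, bs, n, d+1⟩ : EntB) :: rest =>
      have hpos : (0:Nat) < 17 ^ (d+1) := Nat.pow_pos (by norm_num)
      have hμr : (rest.map (fun e => 17 ^ e.d)).sum < k := by
        simp only [List.map_cons, List.sum_cons] at hk
        omega
      rw [loopB]
      by_cases hg : (r == rg && b == bg) = true
      · rw [if_pos hg, ih _ hμr rest _ (le_refl _)]
        simp only [List.foldl_cons]
        congr 1
        simp [pfU, hg]
      · rw [if_neg hg]
        have hcs := childEntries_sum_lt maze N M rg bg r b rs bs n d
        have hμc : (((childEntries maze N M rg bg r b rs bs n d).reverse ++ rest).map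
            (fun e => 17 ^ e.d)).sum < k := by
          simp only [List.map_append, List.sum_append]
          simp only [List.map_cons, List.sum_cons] at hk
          omega
        rw [ih _ hμc _ best (le_refl _)]
        rw [List.foldl_append]
        rw [foldl_reverse_eq _ (fun a x y => pfU_exchange maze N M rg bg a x y)]
        simp only [List.foldl_cons]
        congr 1
        rw [PySem.List.foldl_congr_mem' _ _
          (fun b' (e : EntB) => pfU maze N M rg bg d e.r e.b e.rs e.bs e.n b') best
          (fun e he acc => by rw [childEntries_d maze N M rg bg r b rs bs n d e he])]
        simp [pfU, hg]

theorem set_union_single_of_mem {α : Type} [BEq α] [LawfulBEq α]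
    (s : PySem.Set α) (x : α) (h : x ∈ s) : PySem.Set.union s [x] = s := by
  simp [PySem.Set.union, PySem.Set.update, PySem.Set.add]
  exact h

-- the central invariant: A's threaded-minimum recursion and the unified one-entry
-- recursion agree, given that the check grids represent the visited sets
theorem pf_eq (maze : List (List Int)) (Nn Mn : Nat) :
    ∀ (fuel : Nat) (rc bc : List (List Int)) (rs bs : PySem.Set (Int × Int))
      (ry rx byy bxx rey rex bey bex n m : Int),
      ShapeG rc Nn Mn → ShapeG bc Nn Mn → RepG rc rs Nn Mn → RepG bc bs Nn Mn →
      (ry, rx) ∈ rs → (byy, bxx) ∈ bs → 0 ≤ n →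
      min m (pfA maze Nn Mn rey rex bey bex fuel rc bc ry rx byy bxx n m)
        = pfU maze Nn Mn (rey, rex) (bey, bex) fuel (ry, rx) (byy, bxx) rs bs n m := by
  intro fuel
  induction fuel with
  | zero => intros; simp [pfA, pfU]
  | succ fuel ih =>
    intro rc bc rs bs ry rx byy bxx rey rex bey bex n m hShr hShb hRr hRb hmr hmb hn
    simp only [pfA, pfU, childEntries]
    have hbr : (((ry, rx) : Int × Int) == (rey, rex)) = (ry == rey && rx == rex) := rfl
    have hbb : (((byy, bxx) : Int × Int) == (bey, bex)) = (byy == bey && bxx == bex) := rfl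
    by_cases hrf : (((ry, rx) : Int × Int) == ((rey, rex) : Int × Int)) = true
    · by_cases hbf : (((byy, bxx) : Int × Int) == ((bey, bex) : Int × Int)) = true
      · -- both at goal
        rw [← hbr] at *
        rw [← hbb] at *
        simp only [hrf, hbf, Bool.true_and, if_true]
        split_ifs <;> omega
      · -- red finished, blue moving
        have hbf' := Bool.eq_false_iff.mpr hbf
        rw [← hbr] at *
        rw [← hbb] at *
        simp only [hrf, hbf', possibleA_true, Bool.true_and, Bool.and_false,
          Bool.not_true, Bool.not_false, Bool.false_and, Bool.false_or, Bool.true_or,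
          Bool.or_false, List.isEmpty_nil, Bool.false_eq_true, Bool.true_eq_false,
          if_true, if_false, List.flatMap_cons, List.flatMap_nil, List.append_nil]
        rw [possibleA_eq maze Nn Mn bc bs byy bxx hRb]
        by_cases hE : (movesB maze (Nn : Int) (Mn : Int) (byy, bxx) bs).isEmpty = true
        · simp only [hE, if_true]
          rw [List.isEmpty_iff.mp hE]
          simp
        · have hE' := Bool.eq_false_iff.mpr hE
          simp only [hE', Bool.false_eq_true, if_false]
          rw [List.foldl_map, List.foldl_filter]
          have hstep : ∀ (acc : Int) (c : Int × Int),
              (if (c.1 == ry && c.2 == rx) = true then acc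
               else min (pfA maze (Nn : Int) (Mn : Int) rey rex bey bex fuel rc
                  (setCell bc c.1 c.2 (n+2)) ry rx c.1 c.2 (n+1) acc) acc) ≤ acc := by
            intro acc c
            split_ifs
            · exact le_refl _
            · exact min_le_right _ _
          rw [min_eq_right (foldl_min_le _ hstep _ m)]
          apply PySem.List.foldl_congr_mem'
          intro nb hnb acc
          obtain ⟨nb1, nb2⟩ := nb
          have hbnd := mem_movesB maze (Nn : Int) (Mn : Int) (byy, bxx) bs (nb1, nb2) hnb
          by_cases hc : ((nb1, nb2) : Int × Int) = (ry, rx)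
          · have hc1 : nb1 = ry := congrArg Prod.fst hc
            have hc2 : nb2 = rx := congrArg Prod.snd hc
            subst hc1
            subst hc2
            simp
          · have hA : (nb1 == ry && nb2 == rx) = false := by
              rcases Decidable.em (nb1 = ry) with h | h
              · simp [h, beq_eq_false_iff_ne,
                  show nb2 ≠ rx from fun hh => hc (by rw [h, hh])]
              · simp [beq_eq_false_iff_ne, h]
            have hq1 : (((ry, rx) : Int × Int) == (nb1, nb2)) = false := by
              rw [beq_eq_false_iff_ne]
              exact fun h => hc h.symm
            have hq2 : (((nb1, nb2) : Int × Int) == (ry, rx)) = false := by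
              rw [beq_eq_false_iff_ne]
              exact hc
            simp only [hA, hq1, hq2, Bool.and_false, Bool.or_false, Bool.not_false,
              Bool.false_eq_true, if_false, if_true]
            rw [set_union_single_of_mem rs (ry, rx) hmr]
            rw [min_comm]
            exact ih rc (setCell bc nb1 nb2 (n+2)) rs (PySem.Set.union bs [(nb1, nb2)])
              ry rx nb1 nb2 rey rex bey bex (n+1) acc hShr
              (ShapeG_setCell bc Nn Mn hShb nb1 nb2 (n+2)
                hbnd.1 hbnd.2.1 hbnd.2.2.1 hbnd.2.2.2)
              hRr
              (RepG_setCell bc bs Nn Mn hShb hRb nb1 nb2 (n+2)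
                hbnd.1 hbnd.2.1 hbnd.2.2.1 hbnd.2.2.2 (by omega))
              hmr
              (by rw [PySem.Set.mem_union]; right; simp)
              (by omega)
    · have hrf' := Bool.eq_false_iff.mpr hrf
      by_cases hbf : (((byy, bxx) : Int × Int) == ((bey, bex) : Int × Int)) = true
      · -- blue finished, red moving
        rw [← hbr] at *
        rw [← hbb] at *
        simp only [hrf', hbf, possibleA_true, Bool.true_and, Bool.and_false,
          Bool.and_true, Bool.not_true, Bool.not_false, Bool.false_and, Bool.false_or,
          Bool.true_or, Bool.or_false, List.isEmpty_nil, Bool.false_eq_true,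
          Bool.true_eq_false, if_true, if_false]
        rw [possibleA_eq maze Nn Mn rc rs ry rx hRr]
        by_cases hE : (movesB maze (Nn : Int) (Mn : Int) (ry, rx) rs).isEmpty = true
        · simp only [hE, Bool.true_or, if_true]
          rw [List.isEmpty_iff.mp hE]
          simp
        · have hE' := Bool.eq_false_iff.mpr hE
          simp only [hE', Bool.false_or, Bool.false_eq_true, if_false]
          rw [List.foldl_flatMap]
          have hstep : ∀ (acc : Int) (c : Int × Int),
              (if (c.1 == byy && c.2 == bxx) = true then acc
               else min (pfA maze (Nn : Int) (Mn : Int) rey rex bey bex fuel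
                  (setCell rc c.1 c.2 (n+2)) bc c.1 c.2 byy bxx (n+1) acc) acc) ≤ acc := by
            intro acc c
            split_ifs
            · exact le_refl _
            · exact min_le_right _ _
          rw [min_eq_right (foldl_min_le _ hstep _ m)]
          apply PySem.List.foldl_congr_mem'
          intro nr hnr acc
          obtain ⟨nr1, nr2⟩ := nr
          have hbnd := mem_movesB maze (Nn : Int) (Mn : Int) (ry, rx) rs (nr1, nr2) hnr
          have hp : (((nr1, nr2) : Int × Int) == (byy, bxx)) = (nr1 == byy && nr2 == bxx) := rfl
          by_cases hc : ((nr1, nr2) : Int × Int) = (byy, bxx)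
          · have h1 : (nr1 == byy && nr2 == bxx) = true := by rw [← hp, beq_iff_eq]; exact hc
            have hpr : (((nr1, nr2) : Int × Int) == (byy, bxx)) = true := by rw [hp]; exact h1
            simp [List.filter_cons, hpr, h1]
          · have h1 : (nr1 == byy && nr2 == bxx) = false := by
              rw [← hp, beq_eq_false_iff_ne]
              exact hc
            have hpr : (((nr1, nr2) : Int × Int) == (byy, bxx)) = false := by rw [hp]; exact h1
            simp only [h1, hpr, List.filter_cons, List.filter_nil, Bool.not_false,
              Bool.true_and, Bool.true_or, Bool.or_false, Bool.and_false,
              Bool.false_and, Bool.false_or, Bool.not_true,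
              Bool.false_eq_true, if_false, if_true, List.map_cons, List.map_nil,
              List.foldl_cons, List.foldl_nil]
            rw [set_union_single_of_mem bs (byy, bxx) hmb]
            rw [min_comm]
            exact ih (setCell rc nr1 nr2 (n+2)) bc (PySem.Set.union rs [(nr1, nr2)]) bs
              nr1 nr2 byy bxx rey rex bey bex (n+1) acc
              (ShapeG_setCell rc Nn Mn hShr nr1 nr2 (n+2)
                hbnd.1 hbnd.2.1 hbnd.2.2.1 hbnd.2.2.2)
              hShb
              (RepG_setCell rc rs Nn Mn hShr hRr nr1 nr2 (n+2)
                hbnd.1 hbnd.2.1 hbnd.2.2.1 hbnd.2.2.2 (by omega))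
              hRb
              (by rw [PySem.Set.mem_union]; right; simp)
              hmb
              (by omega)
      · -- both moving
        have hbf' := Bool.eq_false_iff.mpr hbf
        rw [← hbr] at *
        rw [← hbb] at *
        simp only [hrf', hbf', Bool.and_false, Bool.not_false, Bool.true_and,
          Bool.and_true, Bool.false_eq_true, if_true, if_false]
        rw [possibleA_eq maze Nn Mn rc rs ry rx hRr,
          possibleA_eq maze Nn Mn bc bs byy bxx hRb]
        by_cases hD : ((movesB maze (Nn : Int) (Mn : Int) (ry, rx) rs).isEmpty
            || (movesB maze (Nn : Int) (Mn : Int) (byy, bxx) bs).isEmpty) = true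
        · simp only [hD, if_true]
          rcases Bool.or_eq_true_iff.mp hD with h | h
          · rw [List.isEmpty_iff.mp h]
            simp
          · rw [List.isEmpty_iff.mp h]
            simp only [List.filter_nil, List.map_nil]
            rw [List.flatMap_eq_nil_iff.mpr (fun _ _ => rfl)]
            simp
        · have hD' := Bool.eq_false_iff.mpr hD
          simp only [hD', Bool.false_eq_true, if_false]
          rw [List.foldl_flatMap]
          have hstepIn : ∀ (nr1 nr2 : Int) (acc : Int) (c : Int × Int),
              (if (nr1 == c.1 && nr2 == c.2) = true then acc
               else if (nr1 == byy && nr2 == bxx && c.1 == ry && c.2 == rx) = true then acc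
               else min (pfA maze (Nn : Int) (Mn : Int) rey rex bey bex fuel
                  (setCell rc nr1 nr2 (n+2)) (setCell bc c.1 c.2 (n+2))
                  nr1 nr2 c.1 c.2 (n+1) acc) acc) ≤ acc := by
            intro nr1 nr2 acc c
            split_ifs
            · exact le_refl _
            · exact le_refl _
            · exact min_le_right _ _
          have hstep : ∀ (acc : Int) (c : Int × Int),
              ((movesB maze (Nn : Int) (Mn : Int) (byy, bxx) bs).foldl (fun m nb =>
                if (c.1 == nb.1 && c.2 == nb.2) = true then m
                else if (c.1 == byy && c.2 == bxx && nb.1 == ry && nb.2 == rx) = true then m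
                else min (pfA maze (Nn : Int) (Mn : Int) rey rex bey bex fuel
                  (setCell rc c.1 c.2 (n+2)) (setCell bc nb.1 nb.2 (n+2))
                  c.1 c.2 nb.1 nb.2 (n+1) m) m) acc) ≤ acc := by
            intro acc c
            exact foldl_min_le _ (hstepIn c.1 c.2) _ acc
          rw [min_eq_right (foldl_min_le _ hstep _ m)]
          apply PySem.List.foldl_congr_mem'
          intro nr hnr acc
          obtain ⟨nr1, nr2⟩ := nr
          have hbndr := mem_movesB maze (Nn : Int) (Mn : Int) (ry, rx) rs (nr1, nr2) hnr
          rw [List.foldl_map, List.foldl_filter]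
          apply PySem.List.foldl_congr_mem'
          intro nb hnb acc2
          obtain ⟨nb1, nb2⟩ := nb
          have hbndb := mem_movesB maze (Nn : Int) (Mn : Int) (byy, bxx) bs (nb1, nb2) hnb
          have hp1 : (((nr1, nr2) : Int × Int) == (nb1, nb2)) = (nr1 == nb1 && nr2 == nb2) := rfl
          have hp2 : (((nr1, nr2) : Int × Int) == (byy, bxx)) = (nr1 == byy && nr2 == bxx) := rfl
          have hp3 : (((nb1, nb2) : Int × Int) == (ry, rx)) = (nb1 == ry && nb2 == rx) := rfl
          have hassoc : ((((nr1, nr2) : Int × Int) == (byy, bxx))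
                && (((nb1, nb2) : Int × Int) == (ry, rx)))
              = (nr1 == byy && nr2 == bxx && nb1 == ry && nb2 == rx) := by
            rw [hp2, hp3]
            exact (Bool.and_assoc _ _ _).symm
          by_cases b1 : (nr1 == nb1 && nr2 == nb2) = true
          · have hpr1 : (((nr1, nr2) : Int × Int) == (nb1, nb2)) = true := by
              rw [hp1]; exact b1
            simp [b1, hpr1]
          · have b1' := Bool.eq_false_iff.mpr b1
            have hpr1 : (((nr1, nr2) : Int × Int) == (nb1, nb2)) = false := by
              rw [hp1]; exact b1'
            by_cases b2 : (nr1 == byy && nr2 == bxx && nb1 == ry && nb2 == rx) = true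
            · have hpr2 : ((((nr1, nr2) : Int × Int) == (byy, bxx))
                  && (((nb1, nb2) : Int × Int) == (ry, rx))) = true := by
                rw [hassoc]; exact b2
              simp [b1', b2, hpr1, hpr2]
            · have b2' := Bool.eq_false_iff.mpr b2
              have hpr2 : ((((nr1, nr2) : Int × Int) == (byy, bxx))
                  && (((nb1, nb2) : Int × Int) == (ry, rx))) = false := by
                rw [hassoc]; exact b2'
              simp only [b1', b2', hpr1, hpr2, Bool.or_false, Bool.not_false,
                Bool.false_eq_true, if_false, if_true]
              rw [min_comm]
              exact ih (setCell rc nr1 nr2 (n+2)) (setCell bc nb1 nb2 (n+2))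
                (PySem.Set.union rs [(nr1, nr2)]) (PySem.Set.union bs [(nb1, nb2)])
                nr1 nr2 nb1 nb2 rey rex bey bex (n+1) acc2
                (ShapeG_setCell rc Nn Mn hShr nr1 nr2 (n+2)
                  hbndr.1 hbndr.2.1 hbndr.2.2.1 hbndr.2.2.2)
                (ShapeG_setCell bc Nn Mn hShb nb1 nb2 (n+2)
                  hbndb.1 hbndb.2.1 hbndb.2.2.1 hbndb.2.2.2)
                (RepG_setCell rc rs Nn Mn hShr hRr nr1 nr2 (n+2)
                  hbndr.1 hbndr.2.1 hbndr.2.2.1 hbndr.2.2.2 (by omega))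
                (RepG_setCell bc bs Nn Mn hShb hRb nb1 nb2 (n+2)
                  hbndb.1 hbndb.2.1 hbndb.2.2.1 hbndb.2.2.2 (by omega))
                (by rw [PySem.Set.mem_union]; right; simp)
                (by rw [PySem.Set.mem_union]; right; simp)
                (by omega)

theorem foldl_rel_mem {α β γ : Type} (R : α → β → Prop) (l : List γ)
    (f : α → γ → α) (g : β → γ → β)
    (h : ∀ c ∈ l, ∀ a b, R a b → R (f a c) (g b c)) :
    ∀ a b, R a b → R (l.foldl f a) (l.foldl g b) := by
  induction l with
  | nil => intro a b hab; exact hab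
  | cons c t ih =>
    intro a b hab
    exact ih (fun c' hc' => h c' (List.mem_cons_of_mem _ hc')) _ _
      (h c List.mem_cons_self a b hab)

-- the four scan results agree and are in bounds
def ScanR (Nn Mn : Nat) (s : (Int × Int) × (Int × Int) × (Int × Int) × (Int × Int))
    (d : PySem.Dict Int (Int × Int)) : Prop :=
  (d.getD 1 (0, 0) = s.1 ∧ d.getD 2 (0, 0) = s.2.1 ∧
   d.getD 3 (0, 0) = s.2.2.1 ∧ d.getD 4 (0, 0) = s.2.2.2) ∧
  (∀ p ∈ [s.1, s.2.1, s.2.2.1, s.2.2.2],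
    0 ≤ p.1 ∧ p.1 < (Nn : Int) ∧ 0 ≤ p.2 ∧ p.2 < (Mn : Int))

theorem scan_eq (maze : List (List Int)) (Nn Mn : Nat) (hN : 0 < Nn) (hM : 0 < Mn) :
    ScanR Nn Mn (scanA maze Nn Mn) (scanB maze Nn Mn) := by
  unfold scanA scanB
  refine foldl_rel_mem (ScanR Nn Mn) _ _ _ ?_ _ _ ?_
  · intro i hi a b hab
    obtain ⟨hi0, hiN⟩ := PySem.List.mem_pyRange_one.mp hi
    refine foldl_rel_mem (ScanR Nn Mn) _ _ _ ?_ _ _ hab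
    intro j hj s d hR
    obtain ⟨hj0, hjM⟩ := PySem.List.mem_pyRange_one.mp hj
    obtain ⟨⟨e1, e2, e3, e4⟩, hb⟩ := hR
    have hmem : ∀ p : Int × Int, (p = s.1 ∨ p = s.2.1 ∨ p = s.2.2.1 ∨ p = s.2.2.2) →
        0 ≤ p.1 ∧ p.1 < (Nn : Int) ∧ 0 ≤ p.2 ∧ p.2 < (Mn : Int) := by
      intro p hp
      refine hb p ?_
      rcases hp with rfl | rfl | rfl | rfl <;> simp
    dsimp only
    by_cases h1 : getCell maze i j = 1
    · rw [h1, if_pos rfl, if_pos (by norm_num : (1:Int) ≤ 1 ∧ (1:Int) ≤ 4)]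
      refine ⟨⟨?_, ?_, ?_, ?_⟩, ?_⟩
      · simp [PySem.Dict.getD_insert]
      · simp [PySem.Dict.getD_insert, e2]
      · simp [PySem.Dict.getD_insert, e3]
      · simp [PySem.Dict.getD_insert, e4]
      · intro p hp
        simp only [List.mem_cons, List.not_mem_nil, or_false] at hp
        rcases hp with rfl | rfl | rfl | rfl
        · exact ⟨hi0, hiN, hj0, hjM⟩
        · exact hmem _ (by tauto)
        · exact hmem _ (by tauto)
        · exact hmem _ (by tauto)
    · by_cases h2 : getCell maze i j = 2
      · rw [if_neg h1, h2, if_pos rfl, if_pos (by norm_num : (1:Int) ≤ 2 ∧ (2:Int) ≤ 4)]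
        refine ⟨⟨?_, ?_, ?_, ?_⟩, ?_⟩
        · simp [PySem.Dict.getD_insert, e1]
        · simp [PySem.Dict.getD_insert]
        · simp [PySem.Dict.getD_insert, e3]
        · simp [PySem.Dict.getD_insert, e4]
        · intro p hp
          simp only [List.mem_cons, List.not_mem_nil, or_false] at hp
          rcases hp with rfl | rfl | rfl | rfl
          · exact hmem _ (by tauto)
          · exact ⟨hi0, hiN, hj0, hjM⟩
          · exact hmem _ (by tauto)
          · exact hmem _ (by tauto)
      · by_cases h3 : getCell maze i j = 3
        · rw [if_neg h1, if_neg h2, h3, if_pos rfl,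
            if_pos (by norm_num : (1:Int) ≤ 3 ∧ (3:Int) ≤ 4)]
          refine ⟨⟨?_, ?_, ?_, ?_⟩, ?_⟩
          · simp [PySem.Dict.getD_insert, e1]
          · simp [PySem.Dict.getD_insert, e2]
          · simp [PySem.Dict.getD_insert]
          · simp [PySem.Dict.getD_insert, e4]
          · intro p hp
            simp only [List.mem_cons, List.not_mem_nil, or_false] at hp
            rcases hp with rfl | rfl | rfl | rfl
            · exact hmem _ (by tauto)
            · exact hmem _ (by tauto)
            · exact ⟨hi0, hiN, hj0, hjM⟩
            · exact hmem _ (by tauto)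
        · by_cases h4 : getCell maze i j = 4
          · rw [if_neg h1, if_neg h2, if_neg h3, h4, if_pos rfl,
              if_pos (by norm_num : (1:Int) ≤ 4 ∧ (4:Int) ≤ 4)]
            refine ⟨⟨?_, ?_, ?_, ?_⟩, ?_⟩
            · simp [PySem.Dict.getD_insert, e1]
            · simp [PySem.Dict.getD_insert, e2]
            · simp [PySem.Dict.getD_insert, e3]
            · simp [PySem.Dict.getD_insert]
            · intro p hp
              simp only [List.mem_cons, List.not_mem_nil, or_false] at hp
              rcases hp with rfl | rfl | rfl | rfl
              · exact hmem _ (by tauto)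
              · exact hmem _ (by tauto)
              · exact hmem _ (by tauto)
              · exact ⟨hi0, hiN, hj0, hjM⟩
          · rw [if_neg h1, if_neg h2, if_neg h3, if_neg h4, if_neg (by omega)]
            exact ⟨⟨e1, e2, e3, e4⟩, hb⟩
  · refine ⟨⟨?_, ?_, ?_, ?_⟩, ?_⟩ <;> simp [PySem.Dict.getD_empty]
    omega

-- ===== VERDICT (by name: the statement is the Claim_ definition above) =====
theorem solution_spec : Claim_equal_solution := by
  unfold Claim_equal_solution
  intro maze hdom hpre
  unfold Spec_solution
  obtain ⟨hne, hM0, hrows⟩ := hpre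
  have hN0 : 0 < maze.length := List.length_pos_of_ne_nil hne
  simp only [solution, solution_alt]
  obtain ⟨⟨e1, e2, e3, e4⟩, hbnds⟩ :=
    scan_eq maze maze.length (PySem.List.pyGetD maze 0 ([] : List Int)).length hN0 hM0
  rw [e1, e2, e3, e4]
  have hb1 := hbnds _ (by simp : (scanA maze (maze.length : Int)
      ((PySem.List.pyGetD maze 0 ([] : List Int)).length : Int)).1 ∈ _)
  have hb2 := hbnds _ (by simp : (scanA maze (maze.length : Int)
      ((PySem.List.pyGetD maze 0 ([] : List Int)).length : Int)).2.1 ∈ _)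
  set Mn := (PySem.List.pyGetD maze 0 ([] : List Int)).length with hMn
  set sA := scanA maze (maze.length : Int) (Mn : Int) with hsA
  set zeros : List (List Int) := List.replicate maze.length (List.replicate Mn (0 : Int))
    with hzeros
  set d0 : Nat := 2 * maze.length * Mn + 4 with hd0
  have hShz : ShapeG zeros maze.length Mn := by
    constructor
    · simp [hzeros]
    · intro row hrow
      rw [List.eq_of_mem_replicate hrow]
      simp
  have hz : ∀ y x : Int, 0 ≤ y → y < (maze.length : Int) → 0 ≤ x → x < (Mn : Int) →
      getCell zeros y x = 0 := by
    intro y x hy0 hy hx0 hx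
    unfold getCell
    rw [PySem.List.pyGetD_eq_getElem _ [] hy0 (by simp [hzeros]; omega)]
    simp only [hzeros, List.getElem_replicate]
    rw [PySem.List.pyGetD_eq_getElem _ (0:Int) hx0 (by simp; omega)]
    simp only [List.getElem_replicate]
  have hRep0 : ∀ p : Int × Int, 0 ≤ p.1 → p.1 < (maze.length : Int) → 0 ≤ p.2 →
      p.2 < (Mn : Int) →
      RepG (setCell zeros p.1 p.2 1) (PySem.Set.ofList [p]) maze.length Mn := by
    intro p hp1 hp2 hp3 hp4 y x hy0 hy hx0 hx
    rw [getCell_setCell zeros maze.length Mn hShz p.1 p.2 1 y x hp1 hp2 hp3 hp4 hy0 hy hx0 hx]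
    by_cases hyx : y = p.1 ∧ x = p.2
    · rw [if_pos hyx]
      simp [PySem.Set.mem_ofList, Prod.ext_iff, hyx.1, hyx.2]
    · rw [if_neg hyx]
      rw [hz y x hy0 hy hx0 hx]
      simp [PySem.Set.mem_ofList, Prod.ext_iff]
      tauto
  have hloop := loopB_eq_foldl maze (maze.length : Int) (Mn : Int) sA.2.2.1 sA.2.2.2
    (([(⟨sA.1, sA.2.1, PySem.Set.ofList [sA.1], PySem.Set.ofList [sA.2.1], 0, d0⟩ : EntB)].map
      (fun e => 17 ^ e.d)).sum)
    [⟨sA.1, sA.2.1, PySem.Set.ofList [sA.1], PySem.Set.ofList [sA.2.1], 0, d0⟩] 50 (le_refl _)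
  simp only [List.foldl_cons, List.foldl_nil] at hloop
  rw [hloop]
  have key := pf_eq maze maze.length Mn d0
    (setCell zeros sA.1.1 sA.1.2 1) (setCell zeros sA.2.1.1 sA.2.1.2 1)
    (PySem.Set.ofList [sA.1]) (PySem.Set.ofList [sA.2.1])
    sA.1.1 sA.1.2 sA.2.1.1 sA.2.1.2 sA.2.2.1.1 sA.2.2.1.2 sA.2.2.2.1 sA.2.2.2.2 0 50
    (ShapeG_setCell zeros maze.length Mn hShz sA.1.1 sA.1.2 1
      hb1.1 hb1.2.1 hb1.2.2.1 hb1.2.2.2)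
    (ShapeG_setCell zeros maze.length Mn hShz sA.2.1.1 sA.2.1.2 1
      hb2.1 hb2.2.1 hb2.2.2.1 hb2.2.2.2)
    (hRep0 sA.1 hb1.1 hb1.2.1 hb1.2.2.1 hb1.2.2.2)
    (hRep0 sA.2.1 hb2.1 hb2.2.1 hb2.2.2.1 hb2.2.2.2)
    (by simp [PySem.Set.mem_ofList])
    (by simp [PySem.Set.mem_ofList])
    (le_refl 0)
  simp only [Prod.mk.eta] at key
  rw [min_eq_right (le_trans (pfA_le maze (maze.length : Int) (Mn : Int)
    sA.2.2.1.1 sA.2.2.1.2 sA.2.2.2.1 sA.2.2.2.2 d0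
    (setCell zeros sA.1.1 sA.1.2 1) (setCell zeros sA.2.1.1 sA.2.1.2 1)
    sA.1.1 sA.1.2 sA.2.1.1 sA.2.1.2 0 50) (by norm_num))] at key
  rw [key]
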